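-- pv_equiv track=rewrite | github.com/Nerwosolek/AdventOfCode2023 | sol14.py | bottom_place
-- ===== SOURCE A (Python) =====
-- def bottom_place(column, rock_pos):
--     bottom = rock_pos
--     for i in range(rock_pos-1, -1, -1):
--         bottom = i
--         if column[i] == '#' or column[i] == 'O':
--             bottom = i + 1
--             break
--     return bottom
-- ===== SOURCE B (Python) =====
-- def bottom_place(column, rock_pos):
--     last = -1  # index of the highest obstacle below the rock
--     for i in range(rock_pos):
--         if column[i] == '#' or column[i] == 'O':
--             last = i
--     return last + 1
-- ===== Notes on version B (the rewrite author's own statement) =====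
-- stated objective: alternative
-- what changed: Replaces A's downward scan with early break (first obstacle below the rock) by a forward scan over the prefix keeping the index of the last obstacle seen and returning last+1; Pre_ restricts to the natural domain 0 <= rock_pos <= len(column): above it A raises IndexError, and negative rock_pos is outside the task's natural domain (A's returned value rock_pos there is an accident of its empty loop range; B returns 0).
-- outside the precondition, e.g. on bottom_place('#.O.', -2): A returns -2, B returns 0; on bottom_place('', -1): A returns -1, B returns 0
import Mathlib
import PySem

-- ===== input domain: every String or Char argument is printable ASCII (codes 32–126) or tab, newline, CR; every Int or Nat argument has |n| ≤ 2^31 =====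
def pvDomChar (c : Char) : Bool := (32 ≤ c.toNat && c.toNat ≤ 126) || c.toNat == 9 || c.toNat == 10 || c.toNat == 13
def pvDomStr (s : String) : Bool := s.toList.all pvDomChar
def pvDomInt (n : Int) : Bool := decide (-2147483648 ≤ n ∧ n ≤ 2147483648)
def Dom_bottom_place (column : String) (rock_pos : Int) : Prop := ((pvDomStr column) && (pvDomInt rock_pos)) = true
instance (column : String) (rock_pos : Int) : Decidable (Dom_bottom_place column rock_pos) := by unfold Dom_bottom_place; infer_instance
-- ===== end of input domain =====

-- B replaces A's downward scan that breaks at the first obstacle by a forward scan of the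
-- prefix keeping the last obstacle index (objective: alternative decomposition, same cost).

-- ===== PORT A =====
-- A's for-loop with break: recursion over the descending index list, carrying `bottom`.
def bpLoopA (cs : List Char) : List Int → Int → Int
  | [], bottom => bottom
  | i :: rest, _ =>
    let c := (PySem.List.pyGet? cs i).getD ' '   -- Pre_ keeps every accessed index in range
    if c = '#' ∨ c = 'O' then i + 1 else bpLoopA cs rest i

def bottom_place (column : String) (rock_pos : Int) : Int :=
  bpLoopA column.toList (PySem.List.pyRange (rock_pos - 1) (-1) (-1)) rock_pos

-- ===== PORT B =====
def bottom_place_alt (column : String) (rock_pos : Int) : Int :=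
  (PySem.List.pyRange 0 rock_pos 1).foldl
    (fun last i =>
      let c := (PySem.List.pyGet? column.toList i).getD ' '
      if c = '#' ∨ c = 'O' then i else last) (-1) + 1

-- ===== PRECONDITION & SPEC =====
-- Pre_ restricts to the natural domain 0 ≤ rock_pos ≤ len(column): above len(column) the
-- Python A raises IndexError, and a negative rock position is outside the task's natural
-- domain (A's returned value rock_pos there is an accident of the empty range; B returns 0).
def Pre_bottom_place (column : String) (rock_pos : Int) : Prop :=
  0 ≤ rock_pos ∧ rock_pos ≤ (column.toList.length : Int)
instance (column : String) (rock_pos : Int) : Decidable (Pre_bottom_place column rock_pos) := by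
  unfold Pre_bottom_place; infer_instance

def pvWitness_bottom_place : String × Int := ("#.O.", 3)

def Spec_bottom_place (column : String) (rock_pos : Int) (out : Int) : Prop := out = bottom_place_alt column rock_pos
instance (column : String) (rock_pos : Int) (out : Int) : Decidable (Spec_bottom_place column rock_pos out) := by unfold Spec_bottom_place; infer_instance

-- ===== CLAIM (what is proved, stated in full; the proofs are below) =====
def Claim_equal_bottom_place : Prop := ∀ (column : String) (rock_pos : Int), Dom_bottom_place column rock_pos → Pre_bottom_place column rock_pos → Spec_bottom_place column rock_pos (bottom_place column rock_pos)

-- ===== LEMMAS AND PROOFS =====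

-- Both loops satisfy the same recurrence in n: step at index n, then the loop for n.
theorem bpLoop_eq_fold (cs : List Char) (n : Nat) :
    bpLoopA cs (PySem.List.pyRange ((n : Int) - 1) (-1) (-1)) (n : Int) =
    (PySem.List.pyRange 0 (n : Int) 1).foldl
      (fun last i =>
        let c := (PySem.List.pyGet? cs i).getD ' '
        if c = '#' ∨ c = 'O' then i else last) (-1) + 1 := by
  induction n with
  | zero =>
    rw [PySem.List.pyRange_neg_one_eq_nil (by norm_num),
        PySem.List.pyRange_one_eq_nil (by norm_num)]
    rfl
  | succ n ih =>
    have h1 : ((n : Int) + 1) - 1 = (n : Int) := by ring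
    rw [show ((n + 1 : Nat) : Int) = (n : Int) + 1 by push_cast; ring, h1,
        PySem.List.pyRange_neg_one_cons (by omega),
        PySem.List.pyRange_one_succ_right (by omega),
        List.foldl_append]
    simp only [bpLoopA, List.foldl, PySem.List.pyGet?_natCast]
    by_cases hobs : cs[n]?.getD ' ' = '#' ∨ cs[n]?.getD ' ' = 'O'
    · simp [hobs]
    · simpa [hobs, PySem.List.pyGet?_natCast] using ih

-- ===== VERDICT (by name: the statement is the Claim_ definition above) =====
theorem bottom_place_spec : Claim_equal_bottom_place := by
  intro column rock_pos _ hpre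
  obtain ⟨h0, _⟩ := hpre
  unfold Spec_bottom_place bottom_place bottom_place_alt
  have h : rock_pos = ((rock_pos.toNat : Nat) : Int) := by omega
  rw [h]
  exact bpLoop_eq_fold column.toList rock_pos.toNat
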